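-- pv_equiv track=rewrite | github.com/jorzel/codefights | quick_challange/periodicSequence.py | periodicSequence
-- ===== SOURCE A (Python) =====
-- def periodicSequence(s0, a, b, m):
--     s = [s0]
--     i = 1
--     memo = {}
--     while True:
--         value = (a * s[i-1] + b) % m
--         if value not in memo:
--             memo[value] = i
--         else:
--             return i - memo[value]
--
--         s.append((a * s[i-1] + b) % m)
--         i += 1
-- ===== SOURCE B (Python) =====
-- def periodicSequence(s0, a, b, m):
--     # Floyd tortoise-and-hare cycle detection on x -> (a*x+b) % m: O(1) memory, no dict/list.
--     def step(x):
--         return (a * x + b) % m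
--     x0 = step(s0)
--     tortoise = step(x0)
--     hare = step(tortoise)
--     while tortoise != hare:
--         tortoise = step(tortoise)
--         hare = step(step(hare))
--     period = 1
--     cur = step(tortoise)
--     while cur != tortoise:
--         cur = step(cur)
--         period += 1
--     return period
-- ===== Notes on version B (the rewrite author's own statement) =====
-- stated objective: alternative
-- what changed: Replaced the growing list plus first-seen-index hash map with Floyd's tortoise-and-hare cycle detection (two pointers, then a counting pass over the cycle), using O(1) memory instead of O(mu+lambda).
import Mathlib
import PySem

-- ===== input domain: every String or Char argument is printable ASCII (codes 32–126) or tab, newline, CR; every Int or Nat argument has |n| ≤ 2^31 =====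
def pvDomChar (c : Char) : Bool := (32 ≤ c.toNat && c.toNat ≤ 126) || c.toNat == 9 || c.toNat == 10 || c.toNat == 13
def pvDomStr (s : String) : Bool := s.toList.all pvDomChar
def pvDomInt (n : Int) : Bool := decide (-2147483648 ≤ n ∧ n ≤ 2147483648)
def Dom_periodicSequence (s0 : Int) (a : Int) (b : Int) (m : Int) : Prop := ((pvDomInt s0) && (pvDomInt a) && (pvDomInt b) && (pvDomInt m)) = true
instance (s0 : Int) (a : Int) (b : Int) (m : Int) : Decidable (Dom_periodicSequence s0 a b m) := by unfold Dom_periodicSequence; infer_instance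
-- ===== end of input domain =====

-- B replaces A's trajectory list + first-seen-index dict with Floyd's tortoise-and-hare
-- cycle detection (O(1) memory); return values agree on every input with m ≠ 0.

-- ===== PORT A =====
-- Python list indexing s[i]: negative i counts from the end, none = IndexError (exact;
-- the list s is internal state, kept as an Array so that `s.append` is O(1) as in CPython)
def pvAGet? (s : Array Int) (i : Int) : Option Int :=
  let j := if i < 0 then i + s.size else i
  if j < 0 then none else s[j.toNat]?

-- A's `while True` loop; the fuel argument only makes the recursion total (the proof shows
-- it is never exhausted when m ≠ 0); the `none` branch of s[i-1] is likewise unreachable.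
-- memo is Python's dict, ported as a hash map (same get/insert behaviour on Int keys).
def pvLoopA (a b m : Int) : Nat → Array Int → Int → Std.HashMap Int Int → Int
  | 0, _, _, _ => 0
  | fuel+1, s, i, memo =>
    match pvAGet? s (i-1) with
    | none => 0
    | some prev =>
      let value := PySem.Int.mod (a * prev + b) m
      match memo[value]? with
      | none => pvLoopA a b m fuel (s.push (PySem.Int.mod (a * prev + b) m)) (i + 1) (memo.insert value i)
      | some j => i - j

def periodicSequence (s0 : Int) (a : Int) (b : Int) (m : Int) : Int :=
  pvLoopA a b m (m.natAbs + 2) #[s0] 1 (∅ : Std.HashMap Int Int)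

-- ===== PORT B =====
def pvStep (a b m x : Int) : Int := PySem.Int.mod (a * x + b) m

-- B's first while loop (meeting phase); fuel only makes it total, never exhausted for m ≠ 0
def pvMeet (a b m : Int) : Nat → Int → Int → Int
  | 0, tortoise, _ => tortoise
  | fuel+1, tortoise, hare =>
    if tortoise = hare then tortoise
    else pvMeet a b m fuel (pvStep a b m tortoise) (pvStep a b m (pvStep a b m hare))

-- B's second while loop (cycle-length count); fuel only makes it total
def pvCount (a b m : Int) : Nat → Int → Int → Int → Int
  | 0, _, _, period => period
  | fuel+1, tortoise, cur, period =>
    if cur = tortoise then period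
    else pvCount a b m fuel tortoise (pvStep a b m cur) (period + 1)

def periodicSequence_alt (s0 : Int) (a : Int) (b : Int) (m : Int) : Int :=
  let x0 := pvStep a b m s0
  let t0 := pvStep a b m x0
  let h0 := pvStep a b m t0
  let t := pvMeet a b m (m.natAbs + 2) t0 h0
  pvCount a b m (m.natAbs + 2) t (pvStep a b m t) 1

-- ===== PRECONDITION & SPEC =====
-- Pre_ excludes exactly m = 0, on which Python's `%` raises ZeroDivisionError (in A and in B).
def Pre_periodicSequence (s0 : Int) (a : Int) (b : Int) (m : Int) : Prop := m ≠ 0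
instance (s0 : Int) (a : Int) (b : Int) (m : Int) : Decidable (Pre_periodicSequence s0 a b m) := by unfold Pre_periodicSequence; infer_instance
def pvWitness_periodicSequence : Int × Int × Int × Int := (3, 5, 7, 11)

def Spec_periodicSequence (s0 : Int) (a : Int) (b : Int) (m : Int) (out : Int) : Prop := out = periodicSequence_alt s0 a b m
instance (s0 : Int) (a : Int) (b : Int) (m : Int) (out : Int) : Decidable (Spec_periodicSequence s0 a b m out) := by unfold Spec_periodicSequence; infer_instance

-- ===== CLAIM (what is proved, stated in full; the proofs are below) =====
def Claim_equal_periodicSequence : Prop := ∀ (s0 : Int) (a : Int) (b : Int) (m : Int), Dom_periodicSequence s0 a b m → Pre_periodicSequence s0 a b m → Spec_periodicSequence s0 a b m (periodicSequence s0 a b m)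

-- ===== LEMMAS AND PROOFS =====

-- the set of possible outputs of `x % m` (sign of the divisor); proof-only helper
noncomputable def pvModRange (m : Int) : Finset Int :=
  if 0 < m then Finset.Ico 0 m else Finset.Ioc m 0

lemma pvModRange_card (m : Int) : (pvModRange m).card = m.natAbs := by
  unfold pvModRange
  split_ifs with h
  · rw [Int.card_Ico]; omega
  · rw [Int.card_Ioc]; omega

lemma pvStep_mem (a b m x : Int) (hm : m ≠ 0) : pvStep a b m x ∈ pvModRange m := by
  unfold pvStep pvModRange
  split_ifs with h
  · exact Finset.mem_Ico.mpr ⟨PySem.Int.mod_nonneg _ h, PySem.Int.mod_lt _ h⟩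
  · have := PySem.Int.mod_neg_bounds (a * x + b) (by omega : m < 0)
    exact Finset.mem_Ioc.mpr ⟨this.1, this.2⟩

lemma pvStep_iter (a b m s0 : Int) (n : Nat) :
    pvStep a b m ((pvStep a b m)^[n] s0) = (pvStep a b m)^[n + 1] s0 :=
  (Function.iterate_succ_apply' _ _ _).symm

-- pigeonhole: the trajectory beyond s0 repeats
lemma pvExistsRepeat (s0 a b m : Int) (hm : m ≠ 0) :
    ∃ k p, 0 < p ∧ (pvStep a b m)^[p] ((pvStep a b m)^[k + 1] s0) = (pvStep a b m)^[k + 1] s0 := by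
  have hmaps : ∀ i : Fin (m.natAbs + 1), (pvStep a b m)^[(i : Nat) + 1] s0 ∈ pvModRange m := by
    intro i
    rw [← pvStep_iter]
    exact pvStep_mem a b m _ hm
  have hcard : (pvModRange m).card < (Finset.univ : Finset (Fin (m.natAbs + 1))).card := by
    rw [pvModRange_card, Finset.card_univ, Fintype.card_fin]; omega
  obtain ⟨i, _, j, _, hne, heq⟩ :=
    Finset.exists_ne_map_eq_of_card_lt_of_maps_to hcard (fun i _ => hmaps i)
  rcases Nat.lt_or_ge (i : Nat) (j : Nat) with hij | hij
  · refine ⟨i, (j : Nat) - i, by omega, ?_⟩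
    rw [← Function.iterate_add_apply]
    have he : (j : Nat) - (i : Nat) + ((i : Nat) + 1) = (j : Nat) + 1 := by omega
    rw [he, heq]
  · have hji : (j : Nat) < (i : Nat) := by
      rcases Nat.lt_or_ge (j : Nat) (i : Nat) with h | h
      · exact h
      · exact absurd (Fin.ext (by omega)) hne
    refine ⟨j, (i : Nat) - j, by omega, ?_⟩
    rw [← Function.iterate_add_apply]
    have he : (i : Nat) - (j : Nat) + ((j : Nat) + 1) = (i : Nat) + 1 := by omega
    rw [he, heq.symm]

-- the memo A has built after n completed iterations
def pvMemo (s0 a b m : Int) (n : Nat) : Std.HashMap Int Int :=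
  (List.range n).foldl
    (fun d j => d.insert ((pvStep a b m)^[j + 1] s0) ((j : Int) + 1)) (∅ : Std.HashMap Int Int)

lemma pvMemo_succ (s0 a b m : Int) (n : Nat) :
    pvMemo s0 a b m (n + 1)
      = (pvMemo s0 a b m n).insert ((pvStep a b m)^[n + 1] s0) ((n : Int) + 1) := by
  unfold pvMemo
  rw [List.range_succ, List.foldl_append]
  rfl

lemma pvMemo_get_none (s0 a b m : Int) (n : Nat) (v : Int)
    (h : ∀ j, j < n → (pvStep a b m)^[j + 1] s0 ≠ v) :
    (pvMemo s0 a b m n)[v]? = none := by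
  induction n with
  | zero => simp [pvMemo]
  | succ n ih =>
    rw [pvMemo_succ, Std.HashMap.getElem?_insert,
      if_neg (by simpa using h n (by omega))]
    exact ih (fun j hj => h j (by omega))

lemma pvMemo_get_some (s0 a b m : Int) (n j : Nat) (hj : j < n)
    (hdist : ∀ i k, i < k → k < n → (pvStep a b m)^[i + 1] s0 ≠ (pvStep a b m)^[k + 1] s0) :
    (pvMemo s0 a b m n)[(pvStep a b m)^[j + 1] s0]? = some ((j : Int) + 1) := by
  induction n with
  | zero => omega
  | succ n ih =>
    rw [pvMemo_succ, Std.HashMap.getElem?_insert]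
    rcases Nat.lt_or_ge j n with hjn | hjn
    · rw [if_neg (by simpa using (hdist j n hjn (by omega)).symm)]
      exact ih hjn (fun i k hik hk => hdist i k hik (by omega))
    · have hjn' : j = n := by omega
      subst hjn'
      rw [if_pos (by simp)]

-- A's loop returns lam from any state reached after n completed iterations
lemma pvLoopA_eq (s0 a b m : Int) (mu lam : Nat) (hlam : 0 < lam)
    (hinj : ∀ i j, i < j → j < mu + lam →
      (pvStep a b m)^[i + 1] s0 ≠ (pvStep a b m)^[j + 1] s0)
    (hcyc : (pvStep a b m)^[mu + lam + 1] s0 = (pvStep a b m)^[mu + 1] s0) :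
    ∀ fuel n, n ≤ mu + lam → mu + lam + 1 - n ≤ fuel →
      pvLoopA a b m fuel ((List.range (n + 1)).map (fun k => (pvStep a b m)^[k] s0)).toArray
        ((n : Int) + 1) (pvMemo s0 a b m n) = (lam : Int) := by
  intro fuel
  induction fuel with
  | zero => intro n hn hfuel; omega
  | succ fuel ih =>
    intro n hn hfuel
    have hidx : ((n : Int) + 1 - 1) = ((n : Nat) : Int) := by ring
    have hget : pvAGet?
        ((List.range (n + 1)).map (fun k => (pvStep a b m)^[k] s0)).toArray ((n : Int) + 1 - 1)
        = some ((pvStep a b m)^[n] s0) := by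
      rw [hidx]
      simp only [pvAGet?, if_neg (by omega : ¬ ((n : Nat) : Int) < 0), Int.toNat_natCast,
        List.getElem?_toArray, List.getElem?_map, List.getElem?_range (by omega : n < n + 1)]
      rfl
    have hval : PySem.Int.mod (a * (pvStep a b m)^[n] s0 + b) m
        = (pvStep a b m)^[n + 1] s0 := pvStep_iter a b m s0 n
    rcases Nat.lt_or_ge n (mu + lam) with hlt | hge
    · -- no repeat yet: memo misses, loop continues
      have hnone : (pvMemo s0 a b m n)[(pvStep a b m)^[n + 1] s0]? = none :=
        pvMemo_get_none s0 a b m n _ (fun j hj => hinj j n hj hlt)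
      rw [pvLoopA, hget]
      simp only [hval, hnone, List.push_toArray]
      have hlist : (List.range (n + 1)).map (fun k => (pvStep a b m)^[k] s0)
            ++ [(pvStep a b m)^[n + 1] s0]
          = (List.range (n + 1 + 1)).map (fun k => (pvStep a b m)^[k] s0) := by
        rw [List.range_succ (n := n + 1), List.map_append]
        rfl
      have hmemo : (pvMemo s0 a b m n).insert ((pvStep a b m)^[n + 1] s0) ((n : Int) + 1)
          = pvMemo s0 a b m (n + 1) := (pvMemo_succ s0 a b m n).symm
      have hi : (n : Int) + 1 + 1 = ((n + 1 : Nat) : Int) + 1 := by push_cast; ring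
      rw [hlist, hmemo, hi]
      exact ih (n + 1) (by omega) (by omega)
    · -- n = mu + lam: the value is the repeat of u mu, memo hit, return
      have hn' : n = mu + lam := by omega
      subst hn'
      have hsome : (pvMemo s0 a b m (mu + lam))[(pvStep a b m)^[mu + lam + 1] s0]?
          = some ((mu : Int) + 1) := by
        rw [hcyc]
        exact pvMemo_get_some s0 a b m (mu + lam) mu (by omega)
          (fun i k hik hk => hinj i k hik hk)
      rw [pvLoopA, hget]
      simp only [hval, hsome]
      push_cast
      ring

-- B's meeting loop finds some index k0 ≥ 1 with u (2 k0) = u k0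
lemma pvMeet_eq (s0 a b m : Int) (mu lam : Nat) :
    ∀ fuel k, 1 ≤ k →
      (∃ k', k ≤ k' ∧ k' ≤ mu + lam ∧
        (pvStep a b m)^[2 * k' + 1] s0 = (pvStep a b m)^[k' + 1] s0) →
      mu + lam + 1 - k ≤ fuel →
      ∃ k0, 1 ≤ k0 ∧ (pvStep a b m)^[2 * k0 + 1] s0 = (pvStep a b m)^[k0 + 1] s0 ∧
        pvMeet a b m fuel ((pvStep a b m)^[k + 1] s0) ((pvStep a b m)^[2 * k + 1] s0)
          = (pvStep a b m)^[k0 + 1] s0 := by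
  intro fuel
  induction fuel with
  | zero =>
    rintro k hk ⟨k', hkk', hk', _⟩ hfuel
    omega
  | succ fuel ih =>
    intro k hk hex hfuel
    by_cases heq : (pvStep a b m)^[k + 1] s0 = (pvStep a b m)^[2 * k + 1] s0
    · refine ⟨k, hk, heq.symm, ?_⟩
      rw [pvMeet, if_pos heq]
    · rw [pvMeet, if_neg heq]
      obtain ⟨k', hkk', hk', hrep⟩ := hex
      have hkne : k ≠ k' := by
        rintro rfl; exact heq hrep.symm
      have step1 : pvStep a b m ((pvStep a b m)^[k + 1] s0)
          = (pvStep a b m)^[(k + 1) + 1] s0 := pvStep_iter a b m s0 _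
      have step2 : pvStep a b m (pvStep a b m ((pvStep a b m)^[2 * k + 1] s0))
          = (pvStep a b m)^[2 * (k + 1) + 1] s0 := by
        rw [pvStep_iter a b m s0 _, pvStep_iter a b m s0 _]
        simp only [show 2 * (k + 1) + 1 = 2 * k + 1 + 1 + 1 from by omega]
      rw [step1, step2]
      exact ih (k + 1) (by omega) ⟨k', by omega, hk', hrep⟩ (by omega)

-- B's counting loop returns the minimal period of a point on the cycle
lemma pvCount_eq (a b m t : Int) (lam : Nat) (hlam : 0 < lam)
    (ht : ∀ p, ((pvStep a b m)^[p] t = t ↔ lam ∣ p)) :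
    ∀ fuel p, 1 ≤ p → p ≤ lam → lam + 1 - p ≤ fuel →
      pvCount a b m fuel t ((pvStep a b m)^[p] t) (p : Int) = (lam : Int) := by
  intro fuel
  induction fuel with
  | zero => intro p hp hplam hfuel; omega
  | succ fuel ih =>
    intro p hp hplam hfuel
    by_cases heq : (pvStep a b m)^[p] t = t
    · have hpe : lam = p := Nat.le_antisymm (Nat.le_of_dvd (by omega) ((ht p).mp heq)) hplam
      rw [pvCount, if_pos heq, hpe]
    · have hplt : p < lam := by
        rcases Nat.lt_or_ge p lam with h | h
        · exact h
        · exfalso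
          have hpe : p = lam := by omega
          rw [hpe] at heq
          exact heq ((ht lam).mpr dvd_rfl)
      rw [pvCount, if_neg heq, pvStep_iter a b m t p,
        show (p : Int) + 1 = ((p + 1 : Nat) : Int) by push_cast; ring]
      exact ih (p + 1) (by omega) (by omega) (by omega)

-- ===== VERDICT (by name: the statement is the Claim_ definition above) =====
theorem periodicSequence_spec : Claim_equal_periodicSequence := by
  intro s0 a b m hdom hpre
  unfold Spec_periodicSequence
  have hm : m ≠ 0 := hpre
  -- the eventual repetition, preperiod mu and minimal period lam
  have hex : ∃ k, ∃ p, 0 < p ∧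
      (pvStep a b m)^[p] ((pvStep a b m)^[k + 1] s0) = (pvStep a b m)^[k + 1] s0 :=
    pvExistsRepeat s0 a b m hm
  haveI : DecidablePred (fun k => ∃ p, 0 < p ∧
      (pvStep a b m)^[p] ((pvStep a b m)^[k + 1] s0) = (pvStep a b m)^[k + 1] s0) :=
    fun _ => Classical.dec _
  set mu := Nat.find hex with hmu_def
  obtain ⟨p0, hp0, hfix⟩ := Nat.find_spec hex
  have hmem : (pvStep a b m)^[mu + 1] s0 ∈ Function.periodicPts (pvStep a b m) :=
    Function.mk_mem_periodicPts hp0 hfix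
  set lam := Function.minimalPeriod (pvStep a b m) ((pvStep a b m)^[mu + 1] s0) with hlam_def
  have hlam : 0 < lam := Function.IsPeriodicPt.minimalPeriod_pos hp0 hfix
  have hcyc0 : (pvStep a b m)^[lam] ((pvStep a b m)^[mu + 1] s0)
      = (pvStep a b m)^[mu + 1] s0 := Function.iterate_minimalPeriod
  -- minimality of mu
  have hmu_le : ∀ k p, 0 < p →
      (pvStep a b m)^[p] ((pvStep a b m)^[k + 1] s0) = (pvStep a b m)^[k + 1] s0 →
      mu ≤ k := by
    intro k p hp h
    exact Nat.find_le ⟨p, hp, h⟩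
  -- every point at index ≥ mu has minimal period lam
  have hminP : ∀ k, mu ≤ k →
      Function.minimalPeriod (pvStep a b m) ((pvStep a b m)^[k + 1] s0) = lam := by
    intro k hk
    have he : (pvStep a b m)^[k + 1] s0
        = (pvStep a b m)^[k - mu] ((pvStep a b m)^[mu + 1] s0) := by
      rw [← Function.iterate_add_apply]
      congr 1
      omega
    rw [he, Function.minimalPeriod_apply_iterate hmem]
  have hiff : ∀ k, mu ≤ k → ∀ p,
      ((pvStep a b m)^[p] ((pvStep a b m)^[k + 1] s0) = (pvStep a b m)^[k + 1] s0
        ↔ lam ∣ p) := by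
    intro k hk p
    rw [← hminP k hk]
    exact Function.isPeriodicPt_iff_minimalPeriod_dvd
  -- injectivity before mu + lam
  have hinj : ∀ i j, i < j → j < mu + lam →
      (pvStep a b m)^[i + 1] s0 ≠ (pvStep a b m)^[j + 1] s0 := by
    intro i j hij hj heq
    have hiter : (pvStep a b m)^[j - i] ((pvStep a b m)^[i + 1] s0)
        = (pvStep a b m)^[i + 1] s0 := by
      rw [← Function.iterate_add_apply]
      have he : j - i + (i + 1) = j + 1 := by omega
      rw [he, ← heq]
    have hmui : mu ≤ i := hmu_le i (j - i) (by omega) hiter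
    have hdvd : lam ∣ (j - i) := (hiff i hmui (j - i)).mp hiter
    have := Nat.le_of_dvd (by omega) hdvd
    omega
  have hcyc : (pvStep a b m)^[mu + lam + 1] s0 = (pvStep a b m)^[mu + 1] s0 := by
    rw [show mu + lam + 1 = lam + (mu + 1) by omega, Function.iterate_add_apply, hcyc0]
  -- the first mu + lam trajectory values are distinct outputs of % m: size bound
  have hbound : mu + lam ≤ m.natAbs := by
    have hmaps : ∀ k ∈ (Finset.range (mu + lam) : Finset Nat),
        (fun k => (pvStep a b m)^[k + 1] s0) k ∈ pvModRange m := by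
      intro k _
      show (pvStep a b m)^[k + 1] s0 ∈ pvModRange m
      rw [← pvStep_iter]
      exact pvStep_mem a b m _ hm
    have hinjOn : Set.InjOn (fun k => (pvStep a b m)^[k + 1] s0)
        (Finset.range (mu + lam) : Finset Nat) := by
      intro i hi j hj hij
      simp only [Finset.coe_range, Set.mem_Iio] at hi hj
      by_contra hne
      rcases Nat.lt_or_ge i j with h | h
      · exact hinj i j h hj hij
      · exact hinj j i (by omega) hi hij.symm
    have hc := Finset.card_le_card_of_injOn _ hmaps hinjOn
    rw [Finset.card_range, pvModRange_card] at hc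
    exact hc
  -- a meeting index exists: k' = lam * (mu / lam) + lam
  have hk'ex : ∃ k', 1 ≤ k' ∧ k' ≤ mu + lam ∧
      (pvStep a b m)^[2 * k' + 1] s0 = (pvStep a b m)^[k' + 1] s0 := by
    have h1 := Nat.mod_add_div mu lam
    have h2 := Nat.mod_lt mu hlam
    refine ⟨lam * (mu / lam) + lam, by omega, by omega, ?_⟩
    have hmuk : mu ≤ lam * (mu / lam) + lam := by omega
    have hdvd : lam ∣ lam * (mu / lam) + lam := ⟨mu / lam + 1, by ring⟩
    rw [show 2 * (lam * (mu / lam) + lam) + 1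
          = (lam * (mu / lam) + lam) + ((lam * (mu / lam) + lam) + 1) by omega,
      Function.iterate_add_apply]
    exact (hiff _ hmuk _).mpr hdvd
  -- run B's meeting loop
  obtain ⟨k0, hk0, hrep0, hmeet⟩ :=
    pvMeet_eq s0 a b m mu lam (m.natAbs + 2) 1 (le_refl 1) hk'ex (by omega)
  -- the meeting point is on the cycle
  have hk0iter : (pvStep a b m)^[k0] ((pvStep a b m)^[k0 + 1] s0)
      = (pvStep a b m)^[k0 + 1] s0 := by
    rw [← Function.iterate_add_apply]
    have he : k0 + (k0 + 1) = 2 * k0 + 1 := by omega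
    rw [he, hrep0]
  have hmuk0 : mu ≤ k0 := hmu_le k0 k0 (by omega) hk0iter
  -- B's value
  have hB : periodicSequence_alt s0 a b m = (lam : Int) := by
    simp only [periodicSequence_alt]
    have e0 : pvStep a b m s0 = (pvStep a b m)^[0 + 1] s0 := by
      rw [Function.iterate_one]
    have e1 : pvStep a b m ((pvStep a b m)^[0 + 1] s0) = (pvStep a b m)^[1 + 1] s0 :=
      pvStep_iter a b m s0 1
    have e2 : pvStep a b m ((pvStep a b m)^[1 + 1] s0) = (pvStep a b m)^[2 * 1 + 1] s0 :=
      pvStep_iter a b m s0 2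
    rw [e0, e1, e2, hmeet]
    have e3 : pvStep a b m ((pvStep a b m)^[k0 + 1] s0)
        = (pvStep a b m)^[1] ((pvStep a b m)^[k0 + 1] s0) := by
      rw [Function.iterate_one]
    rw [e3]
    exact_mod_cast pvCount_eq a b m ((pvStep a b m)^[k0 + 1] s0) lam hlam
      (hiff k0 hmuk0) (m.natAbs + 2) 1 (le_refl 1) hlam (by omega)
  -- A's value
  have hA : periodicSequence s0 a b m = (lam : Int) := by
    unfold periodicSequence
    have h0 : #[s0] = ((List.range (0 + 1)).map (fun k => (pvStep a b m)^[k] s0)).toArray := by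
      simp
    have h1 : (1 : Int) = ((0 : Nat) : Int) + 1 := by norm_num
    have h2 : (∅ : Std.HashMap Int Int) = pvMemo s0 a b m 0 := rfl
    rw [h0, h1, h2]
    exact pvLoopA_eq s0 a b m mu lam hlam hinj hcyc (m.natAbs + 2) 0 (by omega) (by omega)
  rw [hA, hB]
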